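-- pv_equiv track=rewrite | github.com/WireCell/wire-cell-python | wirecell/util/wires/gdml.py | _build_connected_components
-- ===== SOURCE A (Python) =====
-- def _build_connected_components(wire_names: list, pairs: list) -> dict:
--     """Build connected components from a list of (name_a, name_b) edge pairs.
--
--     Returns:
--         ``dict[str, frozenset]`` — maps each wire name to the frozenset of
--         all wire names in the same connected component (including itself).
--     """
--     parent = {name: name for name in wire_names}
--
--     def _find(x: str) -> str:
--         while parent[x] != x:
--             parent[x] = parent[parent[x]]
--             x = parent[x]
--         return x
--
--     def _union(x: str, y: str) -> None:
--         px, py = _find(x), _find(y)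
--         if px != py:
--             parent[px] = py
--
--     for n0, n1 in pairs:
--         if n0 in parent and n1 in parent:
--             _union(n0, n1)
--
--     groups: dict = {}
--     for name in wire_names:
--         root = _find(name)
--         groups.setdefault(root, set()).add(name)
--
--     result: dict = {}
--     for members in groups.values():
--         fs = frozenset(members)
--         for name in members:
--             result[name] = fs
--     return result
-- ===== SOURCE B (Python) =====
-- def _build_connected_components(wire_names: list, pairs: list) -> dict:
--     """Label-propagation re-implementation: integer component labels merged in
--     place instead of a union-find forest; simpler, no tree/find machinery."""
--     comp_id = {}
--     order = []
--     for n in wire_names: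
--         if n not in comp_id:
--             comp_id[n] = len(order)
--             order.append(n)
--
--     for a, b in pairs:
--         if a in comp_id and b in comp_id:
--             ca, cb = comp_id[a], comp_id[b]
--             if ca != cb:
--                 for n in order:
--                     if comp_id[n] == cb:
--                         comp_id[n] = ca
--
--     result = {}
--     seen = set()
--     for n in order:
--         if n in seen:
--             continue
--         members = [m for m in order if comp_id[m] == comp_id[n]]
--         fs = frozenset(members)
--         for m in members:
--             result[m] = fs
--             seen.add(m)
--     return result
-- ===== Notes on version B (the rewrite author's own statement) =====
-- stated objective: simpler
-- what changed: Replaces the union-find forest (parent pointers, path compression, find/union, then a root-keyed grouping dict) by direct integer component labels that are rewritten in place when an edge joins two components, with members collected by a plain filter over the deduplicated name list.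
import Mathlib
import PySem

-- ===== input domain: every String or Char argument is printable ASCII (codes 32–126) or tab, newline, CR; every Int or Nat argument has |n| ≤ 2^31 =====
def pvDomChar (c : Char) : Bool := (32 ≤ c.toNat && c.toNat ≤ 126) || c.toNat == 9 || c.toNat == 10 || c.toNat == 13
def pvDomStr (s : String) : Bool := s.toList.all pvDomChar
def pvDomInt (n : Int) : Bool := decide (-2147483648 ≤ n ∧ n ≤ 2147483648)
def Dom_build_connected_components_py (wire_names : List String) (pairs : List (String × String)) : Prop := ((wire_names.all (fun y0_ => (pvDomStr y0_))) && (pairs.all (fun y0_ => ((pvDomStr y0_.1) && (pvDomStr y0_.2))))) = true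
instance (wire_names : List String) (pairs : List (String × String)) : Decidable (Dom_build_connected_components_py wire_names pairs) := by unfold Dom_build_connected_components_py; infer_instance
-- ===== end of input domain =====

-- B replaces A's union-find forest by plain integer component labels rewritten on
-- each merge (objective: simpler; equal return values, no observable mutation).

-- ===== PORT A =====
-- `_find` with path compression: `while parent[x] != x: parent[x] = parent[parent[x]]; x = parent[x]`.
-- The fuel argument is only a totality guard (the Python loop terminates on every
-- state A builds; the ports are run with fuel larger than any possible chain length).
-- `parent[x]` is ported as getD x x: `_find` is only reached with x a key of parent,
-- and then the default is never used (exact there).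
def pvFindA : Nat → PySem.Dict String String → String → PySem.Dict String String × String
  | 0, p, x => (p, x)
  | fuel+1, p, x =>
    let px := p.getD x x
    if px = x then (p, x)
    else
      let gx := p.getD px px
      pvFindA fuel (p.insert x gx) gx

-- `_union`: px, py = _find(x), _find(y); if px != py: parent[px] = py
def pvUnionA (fuel : Nat) (p : PySem.Dict String String) (x y : String) :
    PySem.Dict String String :=
  let r1 := pvFindA fuel p x
  let r2 := pvFindA fuel r1.1 y
  if r1.2 = r2.2 then r2.1 else r2.1.insert r1.2 r2.2

def build_connected_components_py (wire_names : List String) (pairs : List (String × String)) : List (String × List String) :=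
  let fuel := wire_names.length + pairs.length + 1
  -- parent = {name: name for name in wire_names}
  let parent0 : PySem.Dict String String :=
    wire_names.foldl (fun d n => d.insert n n) PySem.Dict.empty
  -- for n0, n1 in pairs: if n0 in parent and n1 in parent: _union(n0, n1)
  let parent1 := pairs.foldl
    (fun p ab => if p.contains ab.1 && p.contains ab.2 then pvUnionA fuel p ab.1 ab.2 else p)
    parent0
  -- for name in wire_names: root = _find(name); groups.setdefault(root, set()).add(name)
  let st := wire_names.foldl
    (fun (st : PySem.Dict String String × PySem.Dict String (PySem.Set String)) name =>
      let fr := pvFindA fuel st.1 name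
      (fr.1, st.2.insert fr.2 (PySem.Set.add (st.2.getD fr.2 PySem.Set.empty) name)))
    (parent1, PySem.Dict.empty)
  -- for members in groups.values(): fs = frozenset(members); for name in members: result[name] = fs
  let result := st.2.values.foldl
    (fun r members => members.foldl (fun r n => PySem.Dict.insert r n members) r)
    PySem.Dict.empty
  result.items

-- ===== PORT B =====
def build_connected_components_py_alt (wire_names : List String) (pairs : List (String × String)) : List (String × List String) :=
  -- first loop: comp_id / order
  let st0 := wire_names.foldl
    (fun (st : PySem.Dict String Int × List String) n =>
      if st.1.contains n then st else (st.1.insert n (st.2.length : Int), st.2 ++ [n]))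
    (PySem.Dict.empty, [])
  let cid0 := st0.1
  let order := st0.2
  -- for a, b in pairs: if both known and labels differ, relabel cb -> ca
  let cid := pairs.foldl
    (fun c ab =>
      if c.contains ab.1 && c.contains ab.2 then
        let ca := c.getD ab.1 0
        let cb := c.getD ab.2 0
        if ca = cb then c
        else order.foldl (fun c n => if c.getD n 0 = cb then c.insert n ca else c) c
      else c)
    cid0
  -- emission: for each unseen name, emit its whole component
  let fin := order.foldl
    (fun (st : PySem.Dict String (List String) × PySem.Set String) n =>
      if st.2.contains n then st
      else
        let members := order.filter (fun m => cid.getD m 0 == cid.getD n 0)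
        members.foldl (fun st m => (st.1.insert m members, st.2.add m)) st)
    (PySem.Dict.empty, PySem.Set.empty)
  fin.1.items

-- ===== PRECONDITION & SPEC =====
def Spec_build_connected_components_py (wire_names : List String) (pairs : List (String × String)) (out : List (String × List String)) : Prop := out = build_connected_components_py_alt wire_names pairs
instance (wire_names : List String) (pairs : List (String × String)) (out : List (String × List String)) : Decidable (Spec_build_connected_components_py wire_names pairs out) := by unfold Spec_build_connected_components_py; infer_instance

-- ===== CLAIM (what is proved, stated in full; the proofs are below) =====
def Claim_equal_build_connected_components_py : Prop := ∀ (wire_names : List String) (pairs : List (String × String)), Dom_build_connected_components_py wire_names pairs → Spec_build_connected_components_py wire_names pairs (build_connected_components_py wire_names pairs)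

-- ===== LEMMAS AND PROOFS =====

-- the parent dict / comp_id dict read as total functions
def pvG (p : PySem.Dict String String) : String → String := fun y => p.getD y y
def pvC (c : PySem.Dict String Int) : String → Int := fun y => c.getD y 0

-- `RootedN f n x rt`: following f from x reaches the fixpoint rt in ≤ n steps
def RootedN (f : String → String) : Nat → String → String → Prop
  | 0, x, rt => x = rt ∧ f x = x
  | n+1, x, rt => (x = rt ∧ f x = x) ∨ (f x ≠ x ∧ RootedN f n (f x) rt)

theorem rootedN_mono {f : String → String} {n m : Nat} {x rt : String}
    (h : RootedN f n x rt) (hnm : n ≤ m) : RootedN f m x rt := by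
  induction n generalizing x m with
  | zero => cases m with
    | zero => exact h
    | succ m => exact Or.inl h
  | succ n ih =>
    cases m with
    | zero => omega
    | succ m =>
      cases h with
      | inl h => exact Or.inl h
      | inr h => exact Or.inr ⟨h.1, ih h.2 (by omega)⟩

theorem rootedN_self {f : String → String} {rt : String} (h : f rt = rt) (n : Nat) :
    RootedN f n rt rt := by
  cases n with
  | zero => exact ⟨rfl, h⟩
  | succ n => exact Or.inl ⟨rfl, h⟩

theorem rootedN_fix {f : String → String} {n : Nat} {x rt : String}
    (hx : f x = x) (h : RootedN f n x rt) : rt = x := by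
  cases n with
  | zero => exact h.1.symm
  | succ n =>
    cases h with
    | inl h => exact h.1.symm
    | inr h => exact absurd hx h.1

theorem rootedN_fix_rt {f : String → String} {n : Nat} {x rt : String}
    (h : RootedN f n x rt) : f rt = rt := by
  induction n generalizing x with
  | zero => exact h.1 ▸ h.2
  | succ n ih =>
    cases h with
    | inl h => exact h.1 ▸ h.2
    | inr h => exact ih h.2

-- no 2-cycle can be rooted
theorem rootedN_no2cycle {f : String → String} {x : String}
    (h1 : f x ≠ x) (h2 : f (f x) = x) : ∀ n s, ¬ RootedN f n x s := by
  intro n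
  induction n using Nat.strong_induction_on with
  | _ n ih =>
    intro s h
    cases n with
    | zero => exact h1 h.2
    | succ n =>
      cases h with
      | inl h => exact h1 h.2
      | inr h =>
        cases n with
        | zero =>
          have := h.2.2
          rw [h2] at this
          exact h1 this.symm
        | succ n =>
          cases h.2 with
          | inl h' =>
            have := h'.2
            rw [h2] at this
            exact h1 this.symm
          | inr h' =>
            have h4 := h'.2
            rw [h2] at h4
            exact ih n (by omega) s h4

-- path compression step preserves every rootedness fact
theorem rootedN_compress {f f' : String → String} {x : String}
    (hx : f x ≠ x) (hf' : ∀ y, f' y = if y = x then f (f x) else f y) :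
    ∀ m y s, RootedN f m y s → RootedN f' m y s := by
  intro m
  induction m using Nat.strong_induction_on with
  | _ m ih =>
    intro y s h
    by_cases hy : y = x
    · subst hy
      cases m with
      | zero => exact absurd h.2 hx
      | succ m =>
        cases h with
        | inl h => exact absurd h.2 hx
        | inr h =>
          obtain ⟨-, h2⟩ := h
          by_cases hpx : f (f y) = f y
          · have hne2 : f (f y) ≠ y := by rw [hpx]; exact hx
            refine Or.inr ⟨by rw [hf' y, if_pos rfl]; exact hne2, ?_⟩
            rw [hf' y, if_pos rfl, hpx]
            exact ih m (by omega) (f y) s h2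
          · cases m with
            | zero => exact absurd h2.2 hpx
            | succ m =>
              cases h2 with
              | inl h2 => exact absurd h2.2 hpx
              | inr h2 =>
                obtain ⟨-, h4⟩ := h2
                have hgx : f (f y) ≠ y := by
                  intro hc
                  have h5 : RootedN f m y s := by rw [← hc]; exact h4
                  exact rootedN_no2cycle hx hc m s h5
                refine Or.inr ⟨by rw [hf' y, if_pos rfl]; exact hgx, ?_⟩
                rw [hf' y, if_pos rfl]
                exact rootedN_mono (ih m (by omega) (f (f y)) s h4) (by omega)
    · have hfy : f' y = f y := by rw [hf' y, if_neg hy]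
      cases m with
      | zero => exact ⟨h.1, by rw [hfy]; exact h.2⟩
      | succ m =>
        cases h with
        | inl h => exact Or.inl ⟨h.1, by rw [hfy]; exact h.2⟩
        | inr h =>
          exact Or.inr ⟨by rw [hfy]; exact h.1,
            by rw [hfy]; exact ih m (by omega) (f y) s h.2⟩

-- union step: rerooting the class of px under py
theorem rootedN_union {f f' : String → String} {px py : String}
    (hpx : f px = px) (hpy : f py = py) (hne : px ≠ py)
    (hf' : ∀ y, f' y = if y = px then py else f y) :
    ∀ m y s, RootedN f m y s → RootedN f' (m+1) y (if s = px then py else s) := by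
  intro m
  induction m using Nat.strong_induction_on with
  | _ m ih =>
    intro y s h
    cases m with
    | zero =>
      obtain ⟨rfl, hfix⟩ := h
      by_cases hyp : y = px
      · subst hyp
        rw [if_pos rfl]
        refine Or.inr ⟨by rw [hf' y, if_pos rfl]; exact fun hc => hne hc.symm, ?_⟩
        have hpyfix : f' py = py := by rw [hf' py, if_neg (Ne.symm hne)]; exact hpy
        have hfy : f' y = py := by rw [hf' y, if_pos rfl]
        rw [hfy]
        exact rootedN_self hpyfix 0
      · rw [if_neg hyp]
        exact rootedN_self (by rw [hf' y, if_neg hyp]; exact hfix) 1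
    | succ m =>
      cases h with
      | inl h =>
        obtain ⟨rfl, hfix⟩ := h
        by_cases hyp : y = px
        · subst hyp
          rw [if_pos rfl]
          refine Or.inr ⟨by rw [hf' y, if_pos rfl]; exact fun hc => hne hc.symm, ?_⟩
          have hpyfix : f' py = py := by rw [hf' py, if_neg (Ne.symm hne)]; exact hpy
          have hfy : f' y = py := by rw [hf' y, if_pos rfl]
          rw [hfy]
          exact rootedN_self hpyfix _
        · rw [if_neg hyp]
          exact rootedN_self (by rw [hf' y, if_neg hyp]; exact hfix) _
      | inr h =>
        have hyp : y ≠ px := fun hc => h.1 (hc ▸ hpx)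
        refine Or.inr ⟨by rw [hf' y, if_neg hyp]; exact h.1, ?_⟩
        rw [hf' y, if_neg hyp]
        exact ih m (by omega) (f y) s h.2

theorem pvG_insert (p : PySem.Dict String String) (x v y : String) :
    pvG (p.insert x v) y = if y = x then v else pvG p y := by
  simp [pvG, PySem.Dict.getD_insert]

theorem contains_of_pvG_ne (p : PySem.Dict String String) (x : String)
    (h : pvG p x ≠ x) : p.contains x = true := by
  cases hc : p.contains x with
  | true => rfl
  | false => exact absurd (PySem.Dict.getD_of_not_contains p x hc) h

theorem pvFindA_succ (fuel : Nat) (p : PySem.Dict String String) (x : String) :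
    pvFindA (fuel+1) p x =
      if p.getD x x = x then (p, x)
      else pvFindA fuel (p.insert x (p.getD (p.getD x x) (p.getD x x)))
        (p.getD (p.getD x x) (p.getD x x)) := by
  show (if h : p.getD x x = x then _ else _) = _
  split <;> rfl

theorem pvFindA_spec :
    ∀ (fuel n : Nat) (p : PySem.Dict String String) (x rt : String) (ord : List String),
    RootedN (pvG p) n x rt → n ≤ fuel →
    (∀ z ∈ ord, pvG p z ∈ ord) → x ∈ ord →
    (pvFindA fuel p x).2 = rt ∧
    (∀ m y s, RootedN (pvG p) m y s → RootedN (pvG (pvFindA fuel p x).1) m y s) ∧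
    (∀ y, (pvFindA fuel p x).1.contains y = p.contains y) ∧
    (∀ z ∈ ord, pvG (pvFindA fuel p x).1 z ∈ ord) := by
  intro fuel
  induction fuel with
  | zero =>
    intro n p x rt ord h hn hclos hx
    have hn0 : n = 0 := by omega
    subst hn0
    exact ⟨h.1, fun m y s hy => hy, fun y => rfl, hclos⟩
  | succ fuel ih =>
    intro n p x rt ord h hn hclos hx
    rw [pvFindA_succ]
    by_cases hpx : p.getD x x = x
    · rw [if_pos hpx]
      have hpx' : pvG p x = x := hpx
      have hrt : rt = x := rootedN_fix (x := x) hpx' h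
      exact ⟨hrt.symm, fun m y s hy => hy, fun y => rfl, hclos⟩
    · rw [if_neg hpx]
      have hgd : p.getD (p.getD x x) (p.getD x x) = pvG p (pvG p x) := rfl
      rw [hgd]
      have hpxG : pvG p x ≠ x := hpx
      -- n must be a successor
      cases n with
      | zero => exact absurd h.2 hpx
      | succ n =>
        cases h with
        | inl h => exact absurd h.2 hpx
        | inr h =>
          obtain ⟨-, h2⟩ := h
          -- notation
          have hf' : ∀ y, pvG (p.insert x (pvG p (pvG p x))) y
              = if y = x then pvG p (pvG p x) else pvG p y := by
            intro y
            exact pvG_insert p x _ y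
          have hcomp := rootedN_compress (f := pvG p)
            (f' := pvG (p.insert x (pvG p (pvG p x)))) hpxG hf'
          -- rooted at the grandparent, in the compressed dict
          have h4 : RootedN (pvG (p.insert x (pvG p (pvG p x)))) n
              (pvG p (pvG p x)) rt := by
            by_cases hroot : pvG p (pvG p x) = pvG p x
            · have : RootedN (pvG p) n (pvG p (pvG p x)) rt := by rw [hroot]; exact h2
              exact hcomp n _ rt this
            · cases n with
              | zero => exact absurd h2.2 hroot
              | succ n =>
                cases h2 with
                | inl h2 => exact absurd h2.2 hroot
                | inr h2 =>
                  exact rootedN_mono (hcomp n _ rt h2.2) (by omega)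
          have hgx_ord : pvG p (pvG p x) ∈ ord := hclos _ (hclos _ hx)
          have hclos' : ∀ z ∈ ord, pvG (p.insert x (pvG p (pvG p x))) z ∈ ord := by
            intro z hz
            rw [hf' z]
            by_cases hzx : z = x
            · rw [if_pos hzx]; exact hgx_ord
            · rw [if_neg hzx]; exact hclos z hz
          obtain ⟨c1, c2, c3, c4⟩ := ih n _ _ rt ord h4 (by omega) hclos' hgx_ord
          refine ⟨c1, ?_, ?_, c4⟩
          · intro m y s hy
            exact c2 m y s (hcomp m y s hy)
          · intro y
            rw [c3 y]
            rw [PySem.Dict.contains_insert]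
            by_cases hyx : y = x
            · subst hyx
              simp [contains_of_pvG_ne p y hpxG]
            · simp [hyx]

theorem rootedN_mem {f : String → String} {ord : List String} {n : Nat} {z rt : String}
    (h : RootedN f n z rt) (hclos : ∀ w ∈ ord, f w ∈ ord) (hz : z ∈ ord) : rt ∈ ord := by
  induction n generalizing z with
  | zero => exact h.1 ▸ hz
  | succ n ih =>
    cases h with
    | inl h => exact h.1 ▸ hz
    | inr h => exact ih h.2 (hclos z hz)

theorem pvUnionA_spec (fuel n : Nat) (p : PySem.Dict String String) (x y : String)
    (ord : List String) (r : String → String)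
    (hcont : ∀ z, p.contains z = true ↔ z ∈ ord)
    (hclos : ∀ z ∈ ord, pvG p z ∈ ord)
    (hroot : ∀ z ∈ ord, RootedN (pvG p) n z (r z))
    (hx : x ∈ ord) (hy : y ∈ ord) (hn : n ≤ fuel) :
    (∀ z, (pvUnionA fuel p x y).contains z = p.contains z) ∧
    (∀ z ∈ ord, pvG (pvUnionA fuel p x y) z ∈ ord) ∧
    (∀ z ∈ ord, RootedN (pvG (pvUnionA fuel p x y)) (n+1) z
      (if r x = r y then r z else if r z = r x then r y else r z)) := by
  obtain ⟨a1, a2, a3, a4⟩ := pvFindA_spec fuel n p x (r x) ord (hroot x hx) hn hclos hx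
  obtain ⟨b1, b2, b3, b4⟩ := pvFindA_spec fuel n (pvFindA fuel p x).1 y (r y) ord
    (a2 n y (r y) (hroot y hy)) hn a4 hy
  have hroot2 : ∀ z ∈ ord, RootedN (pvG (pvFindA fuel (pvFindA fuel p x).1 y).1) n z (r z) :=
    fun z hz => b2 n z (r z) (a2 n z (r z) (hroot z hz))
  have hcont2 : ∀ z, (pvFindA fuel (pvFindA fuel p x).1 y).1.contains z = p.contains z :=
    fun z => (b3 z).trans (a3 z)
  have hun : pvUnionA fuel p x y =
      (if (pvFindA fuel p x).2 = (pvFindA fuel (pvFindA fuel p x).1 y).2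
        then (pvFindA fuel (pvFindA fuel p x).1 y).1
        else (pvFindA fuel (pvFindA fuel p x).1 y).1.insert (pvFindA fuel p x).2
          (pvFindA fuel (pvFindA fuel p x).1 y).2) := rfl
  rw [hun, a1, b1]
  by_cases hrxy : r x = r y
  · rw [if_pos hrxy]
    exact ⟨hcont2, b4, fun z hz => by
      rw [if_pos hrxy]
      exact rootedN_mono (hroot2 z hz) (by omega)⟩
  · rw [if_neg hrxy]
    have hrx_ord : r x ∈ ord := rootedN_mem (hroot x hx) hclos hx
    have hry_ord : r y ∈ ord := rootedN_mem (hroot y hy) hclos hy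
    have hfixx : pvG (pvFindA fuel (pvFindA fuel p x).1 y).1 (r x) = r x :=
      rootedN_fix_rt (hroot2 x hx)
    have hfixy : pvG (pvFindA fuel (pvFindA fuel p x).1 y).1 (r y) = r y :=
      rootedN_fix_rt (hroot2 y hy)
    have hf' : ∀ w, pvG ((pvFindA fuel (pvFindA fuel p x).1 y).1.insert (r x) (r y)) w
        = if w = r x then r y else pvG (pvFindA fuel (pvFindA fuel p x).1 y).1 w :=
      fun w => pvG_insert _ (r x) (r y) w
    have hu := rootedN_union hfixx hfixy hrxy hf'
    refine ⟨?_, ?_, ?_⟩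
    · intro z
      rw [PySem.Dict.contains_insert, hcont2 z]
      by_cases hz : z = r x
      · have hcx : p.contains (r x) = true := (hcont (r x)).mpr hrx_ord
        simp [hz, hcx]
      · simp [hz]
    · intro z hz
      rw [hf' z]
      by_cases hzx : z = r x
      · rw [if_pos hzx]; exact hry_ord
      · rw [if_neg hzx]; exact b4 z hz
    · intro z hz
      rw [if_neg hrxy]
      exact hu n z (r z) (hroot2 z hz)

theorem pvC_insert (c : PySem.Dict String Int) (x : String) (v : Int) (y : String) :
    pvC (c.insert x v) y = if y = x then v else pvC c y := by
  simp [pvC, PySem.Dict.getD_insert]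

theorem mergeB_char (l : List String) (hnd : l.Nodup) :
    ∀ (c : PySem.Dict String Int) (ca cb : Int), ca ≠ cb →
    (∀ n ∈ l, c.contains n = true) →
    (∀ z, pvC (l.foldl (fun c n => if c.getD n 0 = cb then c.insert n ca else c) c) z
        = if z ∈ l ∧ pvC c z = cb then ca else pvC c z) ∧
    (∀ z, (l.foldl (fun c n => if c.getD n 0 = cb then c.insert n ca else c) c).contains z
        = c.contains z) := by
  induction l with
  | nil => exact fun c ca cb _ _ => ⟨fun z => by simp, fun z => rfl⟩
  | cons n l ih =>
    intro c ca cb hne hkeys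
    have hnl : n ∉ l := (List.nodup_cons.mp hnd).1
    have hnd' : l.Nodup := (List.nodup_cons.mp hnd).2
    -- the state after processing n
    have hc1 : ∀ z, pvC (if c.getD n 0 = cb then c.insert n ca else c) z
        = if z = n ∧ pvC c z = cb then ca else pvC c z := by
      intro z
      by_cases hcn : c.getD n 0 = cb
      · rw [if_pos hcn, pvC_insert]
        by_cases hz : z = n
        · subst hz
          have hcz : pvC c z = cb := hcn
          simp [hcz]
        · simp [hz]
      · rw [if_neg hcn]
        by_cases hz : z = n
        · subst hz
          have : ¬ (pvC c z = cb) := hcn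
          simp [this]
        · simp [hz]
    have hk1 : ∀ z, (if c.getD n 0 = cb then c.insert n ca else c).contains z = c.contains z := by
      intro z
      by_cases hcn : c.getD n 0 = cb
      · rw [if_pos hcn, PySem.Dict.contains_insert]
        by_cases hz : z = n
        · subst hz; simp [hkeys z (by simp)]
        · simp [hz]
      · rw [if_neg hcn]
    obtain ⟨ih1, ih2⟩ := ih hnd' (if c.getD n 0 = cb then c.insert n ca else c) ca cb hne
      (fun m hm => (hk1 m).trans (hkeys m (by simp [hm])))
    constructor
    · intro z
      rw [List.foldl_cons, ih1 z, hc1 z]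
      by_cases hz : z = n
      · subst hz
        by_cases hcz : pvC c z = cb <;> simp [hnl, hcz]
      · by_cases hzl : z ∈ l <;> by_cases hcz : pvC c z = cb <;> simp [hz, hzl, hcz]
    · intro z
      rw [List.foldl_cons, ih2 z, hk1 z]

-- merged-class equality shape (both sides do exactly this relabelling)
theorem merge_eq_iff {α : Type} [DecidableEq α] (a b u v : α) (hab : a ≠ b) :
    ((if u = a then b else u) = (if v = a then b else v))
      ↔ (u = v ∨ (u = a ∧ v = b) ∨ (u = b ∧ v = a)) := by
  split_ifs with h1 h2 h2 <;> constructor <;> intro h <;> simp_all <;> tauto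

-- the coupling invariant between A's union-find state and B's label state
def CoupInv (ord : List String) (p : PySem.Dict String String) (c : PySem.Dict String Int)
    (k : Nat) (r : String → String) : Prop :=
  (∀ z, p.contains z = true ↔ z ∈ ord) ∧
  (∀ z, c.contains z = true ↔ z ∈ ord) ∧
  (∀ z ∈ ord, pvG p z ∈ ord) ∧
  (∀ z ∈ ord, RootedN (pvG p) k z (r z)) ∧
  (∀ x ∈ ord, ∀ y ∈ ord, (r x = r y ↔ pvC c x = pvC c y))

theorem pair_step (fuel k : Nat) (ord : List String) (hord : ord.Nodup)
    (p : PySem.Dict String String) (c : PySem.Dict String Int) (r : String → String)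
    (ab : String × String) (hI : CoupInv ord p c k r) (hk : k ≤ fuel) :
    ∃ r', CoupInv ord
      (if p.contains ab.1 && p.contains ab.2 then pvUnionA fuel p ab.1 ab.2 else p)
      (if c.contains ab.1 && c.contains ab.2 then
        if c.getD ab.1 0 = c.getD ab.2 0 then c
        else ord.foldl (fun c2 n => if c2.getD n 0 = c.getD ab.2 0 then c2.insert n (c.getD ab.1 0) else c2) c
      else c)
      (k+1) r' := by
  obtain ⟨i1, i2, i3, i4, i5⟩ := hI
  by_cases h1 : ab.1 ∈ ord
  · by_cases h2 : ab.2 ∈ ord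
    · have hga : (p.contains ab.1 && p.contains ab.2) = true := by
        simp [(i1 ab.1).mpr h1, (i1 ab.2).mpr h2]
      have hgb : (c.contains ab.1 && c.contains ab.2) = true := by
        simp [(i2 ab.1).mpr h1, (i2 ab.2).mpr h2]
      rw [if_pos hga, if_pos hgb]
      obtain ⟨u1, u2, u3⟩ := pvUnionA_spec fuel k p ab.1 ab.2 ord r i1 i3 i4 h1 h2 hk
      by_cases heq : r ab.1 = r ab.2
      · -- same class on the A side, same label on the B side: B does nothing
        have hcc : c.getD ab.1 0 = c.getD ab.2 0 := (i5 ab.1 h1 ab.2 h2).mp heq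
        rw [if_pos hcc]
        refine ⟨r, ?_, i2, u2, ?_, i5⟩
        · intro z; rw [u1 z]; exact i1 z
        · intro z hz
          have h := u3 z hz
          rw [if_pos heq] at h
          exact h
      · have hcc : ¬ (c.getD ab.1 0 = c.getD ab.2 0) := fun hc => heq ((i5 ab.1 h1 ab.2 h2).mpr hc)
        rw [if_neg hcc]
        obtain ⟨m1, m2⟩ := mergeB_char ord hord c (c.getD ab.1 0) (c.getD ab.2 0)
          hcc (fun n hn => (i2 n).mpr hn)
        refine ⟨fun z => if r z = r ab.1 then r ab.2 else r z, ?_, ?_, u2, ?_, ?_⟩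
        · intro z; rw [u1 z]; exact i1 z
        · intro z; rw [m2 z]; exact i2 z
        · intro z hz
          have := u3 z hz
          rw [if_neg heq] at this
          exact this
        · intro x hx y hy
          rw [m1 x, m1 y]
          have hmx : (x ∈ ord ∧ pvC c x = c.getD ab.2 0) ↔ (pvC c x = pvC c ab.2) := by
            simp [hx]; exact Iff.rfl
          have hmy : (y ∈ ord ∧ pvC c y = c.getD ab.2 0) ↔ (pvC c y = pvC c ab.2) := by
            simp [hy]; exact Iff.rfl
          rw [merge_eq_iff (r ab.1) (r ab.2) (r x) (r y) heq]
          have hB : (if x ∈ ord ∧ pvC c x = c.getD ab.2 0 then c.getD ab.1 0 else pvC c x)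
              = (if pvC c x = pvC c ab.2 then pvC c ab.1 else pvC c x) := by
            simp [hx]; exact rfl
          have hB' : (if y ∈ ord ∧ pvC c y = c.getD ab.2 0 then c.getD ab.1 0 else pvC c y)
              = (if pvC c y = pvC c ab.2 then pvC c ab.1 else pvC c y) := by
            simp [hy]; exact rfl
          rw [hB, hB']
          have hcab : pvC c ab.2 ≠ pvC c ab.1 := fun hc => hcc hc.symm
          rw [merge_eq_iff (pvC c ab.2) (pvC c ab.1) (pvC c x) (pvC c y) hcab]
          constructor
          · rintro (h | ⟨ha, hb⟩ | ⟨ha, hb⟩)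
            · exact Or.inl ((i5 x hx y hy).mp h)
            · exact Or.inr (Or.inr ⟨(i5 x hx ab.1 h1).mp ha, (i5 y hy ab.2 h2).mp hb⟩)
            · exact Or.inr (Or.inl ⟨(i5 x hx ab.2 h2).mp ha, (i5 y hy ab.1 h1).mp hb⟩)
          · rintro (h | ⟨ha, hb⟩ | ⟨ha, hb⟩)
            · exact Or.inl ((i5 x hx y hy).mpr h)
            · exact Or.inr (Or.inr ⟨(i5 x hx ab.2 h2).mpr ha, (i5 y hy ab.1 h1).mpr hb⟩)
            · exact Or.inr (Or.inl ⟨(i5 x hx ab.1 h1).mpr ha, (i5 y hy ab.2 h2).mpr hb⟩)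
    · have hga : (p.contains ab.1 && p.contains ab.2) = false := by
        have : p.contains ab.2 = false := by
          cases hc : p.contains ab.2
          · rfl
          · exact absurd ((i1 ab.2).mp hc) h2
        simp [this]
      have hgb : (c.contains ab.1 && c.contains ab.2) = false := by
        have : c.contains ab.2 = false := by
          cases hc : c.contains ab.2
          · rfl
          · exact absurd ((i2 ab.2).mp hc) h2
        simp [this]
      rw [if_neg (by simp [hga]), if_neg (by simp [hgb])]
      exact ⟨r, i1, i2, i3, fun z hz => rootedN_mono (i4 z hz) (by omega), i5⟩
  · have hga : (p.contains ab.1 && p.contains ab.2) = false := by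
      have : p.contains ab.1 = false := by
        cases hc : p.contains ab.1
        · rfl
        · exact absurd ((i1 ab.1).mp hc) h1
      simp [this]
    have hgb : (c.contains ab.1 && c.contains ab.2) = false := by
      have : c.contains ab.1 = false := by
        cases hc : c.contains ab.1
        · rfl
        · exact absurd ((i2 ab.1).mp hc) h1
      simp [this]
    rw [if_neg (by simp [hga]), if_neg (by simp [hgb])]
    exact ⟨r, i1, i2, i3, fun z hz => rootedN_mono (i4 z hz) (by omega), i5⟩

theorem pairs_fold (fuel : Nat) (ord : List String) (hord : ord.Nodup) :
    ∀ (l : List (String × String)) (k : Nat) (p : PySem.Dict String String)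
      (c : PySem.Dict String Int) (r : String → String),
    CoupInv ord p c k r → k + l.length ≤ fuel →
    ∃ r', CoupInv ord
      (l.foldl (fun p ab => if p.contains ab.1 && p.contains ab.2
          then pvUnionA fuel p ab.1 ab.2 else p) p)
      (l.foldl (fun c ab => if c.contains ab.1 && c.contains ab.2 then
          if c.getD ab.1 0 = c.getD ab.2 0 then c
          else ord.foldl (fun c2 n => if c2.getD n 0 = c.getD ab.2 0
            then c2.insert n (c.getD ab.1 0) else c2) c
        else c) c)
      (k + l.length) r' := by
  intro l
  induction l with
  | nil => exact fun k p c r hI _ => ⟨r, hI⟩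
  | cons ab l ih =>
    intro k p c r hI hle
    obtain ⟨r1, hI1⟩ := pair_step fuel k ord hord p c r ab hI (by simp at hle; omega)
    obtain ⟨r', hI'⟩ := ih (k+1) _ _ r1 hI1 (by simp at hle ⊢; omega)
    exact ⟨r', by
      have hlen : k + (ab :: l).length = (k + 1) + l.length := by simp; omega
      rw [List.foldl_cons, List.foldl_cons, hlen]
      exact hI'⟩

theorem initA_g (l : List String) :
    ∀ (d : PySem.Dict String String), (∀ z, pvG d z = z) →
    ∀ z, pvG (l.foldl (fun d n => d.insert n n) d) z = z := by
  induction l with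
  | nil => exact fun d h => h
  | cons n l ih =>
    intro d h z
    refine ih (d.insert n n) ?_ z
    intro w
    rw [pvG_insert]
    by_cases hw : w = n
    · rw [if_pos hw, hw]
    · rw [if_neg hw]; exact h w

theorem initA_contains (l : List String) :
    ∀ z, (l.foldl (fun d n => d.insert n n) PySem.Dict.empty).contains z = true
      ↔ z ∈ PySem.Set.ofList l := by
  intro z
  have hk := PySem.Dict.keys_foldl_insert l (fun _ n => n) PySem.Dict.empty
  rw [PySem.Dict.contains_iff_mem_keys, hk]
  have : (PySem.Dict.empty : PySem.Dict String String).keys = ([] : List String) := rfl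
  rw [this]
  rw [PySem.Set.ofList_eq_foldl]
  exact Iff.rfl

theorem set_add_of_mem {s : PySem.Set String} {n : String} (h : n ∈ s) :
    PySem.Set.add s n = s := by
  simp only [PySem.Set.add, (PySem.Set.contains_iff s n).mpr h, if_true]

theorem set_add_of_not_mem {s : PySem.Set String} {n : String} (h : n ∉ s) :
    PySem.Set.add s n = s ++ [n] := by
  have hcf : PySem.Set.contains s n = false :=
    Bool.eq_false_iff.mpr (fun hc => h ((PySem.Set.contains_iff s n).mp hc))
  simp only [PySem.Set.add, hcf, Bool.false_eq_true, if_false]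

theorem initB_char (l : List String) :
    ∀ (c : PySem.Dict String Int) (o : List String),
    (∀ z, c.contains z = true ↔ z ∈ o) → o.Nodup →
    (∀ x ∈ o, 0 ≤ pvC c x ∧ pvC c x < (o.length : Int)) →
    (∀ x ∈ o, ∀ y ∈ o, (pvC c x = pvC c y ↔ x = y)) →
    (l.foldl (fun st n => if st.1.contains n then st
        else (st.1.insert n (st.2.length : Int), st.2 ++ [n])) (c, o)).2
      = PySem.Set.update o l ∧
    (∀ z, (l.foldl (fun st n => if st.1.contains n then st
        else (st.1.insert n (st.2.length : Int), st.2 ++ [n])) (c, o)).1.contains z = true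
      ↔ z ∈ PySem.Set.update o l) ∧
    (PySem.Set.update o l).Nodup ∧
    (∀ x ∈ PySem.Set.update o l, ∀ y ∈ PySem.Set.update o l,
      (pvC (l.foldl (fun st n => if st.1.contains n then st
        else (st.1.insert n (st.2.length : Int), st.2 ++ [n])) (c, o)).1 x
      = pvC (l.foldl (fun st n => if st.1.contains n then st
        else (st.1.insert n (st.2.length : Int), st.2 ++ [n])) (c, o)).1 y ↔ x = y)) ∧
    (∀ x ∈ PySem.Set.update o l,
      0 ≤ pvC (l.foldl (fun st n => if st.1.contains n then st
        else (st.1.insert n (st.2.length : Int), st.2 ++ [n])) (c, o)).1 x ∧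
      pvC (l.foldl (fun st n => if st.1.contains n then st
        else (st.1.insert n (st.2.length : Int), st.2 ++ [n])) (c, o)).1 x
        < ((PySem.Set.update o l).length : Int)) := by
  induction l with
  | nil =>
    intro c o h1 h2 h3 h4
    have hu : PySem.Set.update o [] = o := rfl
    rw [hu]
    exact ⟨rfl, h1, h2, h4, h3⟩
  | cons n l ih =>
    intro c o h1 h2 h3 h4
    have hstep : PySem.Set.update o (n :: l) = PySem.Set.update (PySem.Set.add o n) l := rfl
    by_cases hc : c.contains n = true
    · have hmem : n ∈ o := (h1 n).mp hc
      have hadd : PySem.Set.add o n = o := set_add_of_mem hmem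
      rw [List.foldl_cons]
      have heq2 : (if ((c, o) : PySem.Dict String Int × List String).1.contains n = true
          then ((c, o) : PySem.Dict String Int × List String)
          else ((c, o).1.insert n ((c, o).2.length : Int), (c, o).2 ++ [n])) = (c, o) := by
        simp [hc]
      rw [heq2, hstep, hadd]
      exact ih c o h1 h2 h3 h4
    · have hcf : c.contains n = false := Bool.eq_false_iff.mpr hc
      have hmem : n ∉ o := fun hm => hc ((h1 n).mpr hm)
      have hadd : PySem.Set.add o n = o ++ [n] := set_add_of_not_mem hmem
      rw [List.foldl_cons]
      have heq2 : (if ((c, o) : PySem.Dict String Int × List String).1.contains n = true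
          then ((c, o) : PySem.Dict String Int × List String)
          else ((c, o).1.insert n ((c, o).2.length : Int), (c, o).2 ++ [n]))
          = (c.insert n (o.length : Int), o ++ [n]) := by
        simp [hcf]
      rw [heq2, hstep, hadd]
      refine ih (c.insert n (o.length : Int)) (o ++ [n]) ?_ ?_ ?_ ?_
      · intro z
        rw [PySem.Dict.contains_insert]
        by_cases hz : z = n
        · simp [hz]
        · simp [hz, h1 z]
      · have hd : o.Disjoint [n] := by
          intro a ha hb
          simp at hb
          exact hmem (hb ▸ ha)
        exact h2.append (List.nodup_singleton n) hd
      · intro x hx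
        rw [pvC_insert]
        simp at hx
        rcases hx with hx | hx
        · rw [if_neg (show ¬ (x = n) from fun hc2 => hmem (hc2 ▸ hx))]
          have := h3 x hx
          constructor
          · exact this.1
          · have hlen : ((o ++ [n]).length : Int) = (o.length : Int) + 1 := by simp
            omega
        · rw [if_pos hx]
          constructor
          · positivity
          · simp
      · intro x hx y hy
        rw [pvC_insert, pvC_insert]
        simp at hx hy
        rcases hx with hx | hx <;> rcases hy with hy | hy
        · rw [if_neg (show ¬ (x = n) from fun hc2 => hmem (hc2 ▸ hx)), if_neg (show ¬ (y = n) from fun hc2 => hmem (hc2 ▸ hy))]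
          exact h4 x hx y hy
        · rw [if_neg (show ¬ (x = n) from fun hc2 => hmem (hc2 ▸ hx)), if_pos hy]
          have := h3 x hx
          constructor
          · intro hcontra; exact absurd hcontra (by omega)
          · intro hxy; exact absurd ((hxy.trans hy) ▸ hx) hmem
        · rw [if_pos hx, if_neg (show ¬ (y = n) from fun hc2 => hmem (hc2 ▸ hy))]
          have := h3 y hy
          constructor
          · intro hcontra; exact absurd hcontra.symm (by omega)
          · intro hxy; exact absurd ((hxy.symm.trans hx) ▸ hy) hmem
        · rw [if_pos hx, if_pos hy]
          constructor
          · intro _; exact hx.trans hy.symm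
          · intro _; rfl

-- first representative of each class, scanning left to right
def pvFirsts {α : Type} [DecidableEq α] (f : String → α) : List String → List String → List String
  | _, [] => []
  | done, n :: l =>
    if done.any (fun m => decide (f m = f n)) then pvFirsts f (done ++ [n]) l
    else n :: pvFirsts f (done ++ [n]) l

theorem pvFirsts_append {α : Type} [DecidableEq α] (f : String → α) (t : List String) :
    ∀ (done rest : List String),
    pvFirsts f done (t ++ rest) = pvFirsts f done t ++ pvFirsts f (done ++ t) rest := by
  induction t with
  | nil => intro done rest; simp [pvFirsts]
  | cons n t ih =>
    intro done rest
    rw [List.cons_append]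
    by_cases h : done.any (fun m => decide (f m = f n)) = true
    · rw [pvFirsts, if_pos h, pvFirsts, if_pos h, ih]
      simp
    · rw [pvFirsts, if_neg h, pvFirsts, if_neg h, ih]
      simp

theorem set_ofList_append {α : Type} [BEq α] (l : List α) (x : α) :
    PySem.Set.ofList (l ++ [x]) = PySem.Set.add (PySem.Set.ofList l) x := by
  rw [PySem.Set.ofList_eq_foldl, PySem.Set.ofList_eq_foldl, List.foldl_append]
  rfl

theorem set_add_of_mem' {α : Type} [BEq α] [LawfulBEq α] {s : PySem.Set α} {n : α} (h : n ∈ s) :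
    PySem.Set.add s n = s := by
  simp only [PySem.Set.add, (PySem.Set.contains_iff s n).mpr h, if_true]

theorem set_add_of_not_mem' {α : Type} [BEq α] [LawfulBEq α] {s : PySem.Set α} {n : α} (h : n ∉ s) :
    PySem.Set.add s n = s ++ [n] := by
  have hcf : PySem.Set.contains s n = false :=
    Bool.eq_false_iff.mpr (fun hc => h ((PySem.Set.contains_iff s n).mp hc))
  simp only [PySem.Set.add, hcf, Bool.false_eq_true, if_false]

theorem set_ofList_map_firsts {α : Type} [BEq α] [LawfulBEq α] [DecidableEq α]
    (f : String → α) (l : List String) :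
    PySem.Set.ofList (l.map f) = (pvFirsts f [] l).map f := by
  induction l using List.reverseRecOn with
  | nil => rfl
  | append_singleton t n ih =>
    rw [List.map_append, List.map_singleton, set_ofList_append, pvFirsts_append]
    rw [List.map_append, ← ih]
    by_cases h : (([] ++ t : List String)).any (fun m => decide (f m = f n)) = true
    · have hmem : f n ∈ t.map f := by
        simp at h
        obtain ⟨m, hm, he⟩ := h
        exact List.mem_map.mpr ⟨m, hm, he⟩
      have hmem2 : f n ∈ PySem.Set.ofList (t.map f) := (PySem.Set.mem_ofList _ _).mpr hmem
      rw [set_add_of_mem' hmem2, pvFirsts, if_pos h]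
      simp [pvFirsts]
    · have hmem : f n ∉ t.map f := by
        intro hc
        obtain ⟨m, hm, he⟩ := List.mem_map.mp hc
        exact h (by simp; exact ⟨m, hm, he⟩)
      have hmem2 : f n ∉ PySem.Set.ofList (t.map f) :=
        fun hc => hmem ((PySem.Set.mem_ofList _ _).mp hc)
      rw [set_add_of_not_mem' hmem2, pvFirsts, if_neg h]
      simp [pvFirsts]

theorem set_ofList_filter (p : String → Bool) (l : List String) :
    PySem.Set.ofList (l.filter p) = (PySem.Set.ofList l).filter p := by
  induction l using List.reverseRecOn with
  | nil => rfl
  | append_singleton t x ih =>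
    by_cases hp : p x = true
    · have hfx : List.filter p [x] = [x] := by simp [hp]
      rw [List.filter_append, hfx, set_ofList_append, set_ofList_append]
      by_cases hx : x ∈ PySem.Set.ofList t
      · have hxf : x ∈ PySem.Set.ofList (t.filter p) := by
          rw [PySem.Set.mem_ofList]
          exact List.mem_filter.mpr ⟨(PySem.Set.mem_ofList _ _).mp hx, hp⟩
        rw [set_add_of_mem' hx, set_add_of_mem' hxf, ih]
      · have hxf : x ∉ PySem.Set.ofList (t.filter p) := by
          rw [PySem.Set.mem_ofList]
          intro hc
          exact hx ((PySem.Set.mem_ofList _ _).mpr (List.mem_filter.mp hc).1)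
        rw [set_add_of_not_mem' hx, set_add_of_not_mem' hxf, ih, List.filter_append, hfx]
    · have hfx : List.filter p [x] = [] := by simp [hp]
      rw [List.filter_append, hfx, List.append_nil, set_ofList_append, ih]
      by_cases hx : x ∈ PySem.Set.ofList t
      · rw [set_add_of_mem' hx]
      · rw [set_add_of_not_mem' hx, List.filter_append, hfx, List.append_nil]

theorem pvFirsts_congr {α β : Type} [DecidableEq α] [DecidableEq β]
    (f : String → α) (g : String → β) :
    ∀ (l done : List String),
    (∀ m ∈ done ++ l, ∀ n ∈ done ++ l, (f m = f n ↔ g m = g n)) →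
    pvFirsts f done l = pvFirsts g done l := by
  intro l
  induction l with
  | nil => intro done _; rfl
  | cons n l ih =>
    intro done hiff
    have hn : n ∈ done ++ n :: l := by simp
    have hany : (done.any (fun m => decide (f m = f n)))
        = (done.any (fun m => decide (g m = g n))) := by
      rw [Bool.eq_iff_iff]
      simp only [List.any_eq_true, decide_eq_true_eq]
      constructor
      · rintro ⟨m, hm, he⟩
        exact ⟨m, hm, (hiff m (by simp [hm]) n hn).mp he⟩
      · rintro ⟨m, hm, he⟩
        exact ⟨m, hm, (hiff m (by simp [hm]) n hn).mpr he⟩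
    have hiff' : ∀ m ∈ (done ++ [n]) ++ l, ∀ n' ∈ (done ++ [n]) ++ l, (f m = f n' ↔ g m = g n') := by
      intro m hm n' hn'
      exact hiff m (by simp at hm ⊢; tauto) n' (by simp at hn' ⊢; tauto)
    rw [pvFirsts, pvFirsts, hany]
    by_cases h : (done.any (fun m => decide (g m = g n))) = true
    · rw [if_pos h, if_pos h]
      exact ih (done ++ [n]) hiff'
    · rw [if_neg h, if_neg h]
      rw [ih (done ++ [n]) hiff']

theorem pvFirsts_subset {α : Type} [DecidableEq α] (f : String → α) :
    ∀ (l done : List String) (x : String), x ∈ pvFirsts f done l → x ∈ l := by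
  intro l
  induction l with
  | nil => intro done x hx; simp [pvFirsts] at hx
  | cons n l ih =>
    intro done x hx
    rw [pvFirsts] at hx
    by_cases h : (done.any (fun m => decide (f m = f n))) = true
    · rw [if_pos h] at hx
      exact List.mem_cons_of_mem n (ih _ x hx)
    · rw [if_neg h] at hx
      rw [List.mem_cons] at hx
      rcases hx with rfl | hx
      · exact List.mem_cons_self
      · exact List.mem_cons_of_mem n (ih _ x hx)

theorem set_ofList_map_ofList {α : Type} [BEq α] [LawfulBEq α] (f : String → α) (l : List String) :
    PySem.Set.ofList (l.map f) = PySem.Set.ofList ((PySem.Set.ofList l).map f) := by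
  induction l using List.reverseRecOn with
  | nil => rfl
  | append_singleton t x ih =>
    rw [List.map_append, List.map_singleton, set_ofList_append, set_ofList_append]
    by_cases hx : x ∈ PySem.Set.ofList t
    · have hfx : f x ∈ PySem.Set.ofList (t.map f) := by
        rw [PySem.Set.mem_ofList]
        exact List.mem_map.mpr ⟨x, (PySem.Set.mem_ofList _ _).mp hx, rfl⟩
      rw [set_add_of_mem' hfx, set_add_of_mem' hx, ih]
    · rw [set_add_of_not_mem' hx, List.map_append, List.map_singleton, set_ofList_append, ih]

-- groups loop: the stateful find returns the fixed root function; only the dict matters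
theorem groupsA_fold (fuel K : Nat) (ord : List String) (r : String → String) (hK : K ≤ fuel) :
    ∀ (t : List String) (p : PySem.Dict String String) (g : PySem.Dict String (PySem.Set String)),
    (∀ z ∈ ord, RootedN (pvG p) K z (r z)) → (∀ z ∈ ord, pvG p z ∈ ord) →
    (∀ m ∈ t, m ∈ ord) →
    (t.foldl (fun st name =>
        ((pvFindA fuel st.1 name).1,
          st.2.insert (pvFindA fuel st.1 name).2
            (PySem.Set.add (st.2.getD (pvFindA fuel st.1 name).2 PySem.Set.empty) name))) (p, g)).2
      = t.foldl (fun g name =>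
          g.insert (r name) (PySem.Set.add (g.getD (r name) PySem.Set.empty) name)) g := by
  intro t
  induction t with
  | nil => intro p g _ _ _; rfl
  | cons name t ih =>
    intro p g hroot hclos hmem
    have hname : name ∈ ord := hmem name (by simp)
    obtain ⟨c1, c2, c3, c4⟩ := pvFindA_spec fuel K p name (r name) ord
      (hroot name hname) hK hclos hname
    rw [List.foldl_cons, List.foldl_cons]
    rw [c1]
    exact ih (pvFindA fuel p name).1 _
      (fun z hz => c2 K z (r z) (hroot z hz)) c4 (fun m hm => hmem m (by simp [hm]))

-- the pure groups fold, characterized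
theorem groupsPure_items (r : String → String) (t : List String) :
    (t.foldl (fun g name =>
        g.insert (r name) (PySem.Set.add (g.getD (r name) PySem.Set.empty) name))
      (PySem.Dict.empty : PySem.Dict String (PySem.Set String))).items
    = (PySem.Set.ofList (t.map r)).map
        (fun rt => (rt, PySem.Set.ofList (t.filter (fun m => r m == rt)))) := by
  induction t using List.reverseRecOn with
  | nil => rfl
  | append_singleton t n ih =>
    rw [List.foldl_append, List.foldl_cons, List.foldl_nil]
    have hkeys : (t.foldl (fun g name =>
        g.insert (r name) (PySem.Set.add (g.getD (r name) PySem.Set.empty) name))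
      (PySem.Dict.empty : PySem.Dict String (PySem.Set String))).keys
        = PySem.Set.ofList (t.map r) := by
      have h0 : (t.foldl (fun g name =>
          g.insert (r name) (PySem.Set.add (g.getD (r name) PySem.Set.empty) name))
        (PySem.Dict.empty : PySem.Dict String (PySem.Set String))).keys
          = (t.foldl (fun g name =>
          g.insert (r name) (PySem.Set.add (g.getD (r name) PySem.Set.empty) name))
        (PySem.Dict.empty : PySem.Dict String (PySem.Set String))).items.map (fun p => p.1) := rfl
      rw [h0, ih, List.map_map]
      exact (List.map_congr_left (fun a _ => rfl)).trans (List.map_id _)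
    have hnodup : (t.foldl (fun g name =>
        g.insert (r name) (PySem.Set.add (g.getD (r name) PySem.Set.empty) name))
      (PySem.Dict.empty : PySem.Dict String (PySem.Set String))).keys.Nodup := by
      rw [hkeys]; exact PySem.Set.nodup_ofList _
    rw [List.map_append, List.map_singleton, set_ofList_append]
    by_cases hc : r n ∈ PySem.Set.ofList (t.map r)
    · have hcont : (t.foldl (fun g name =>
          g.insert (r name) (PySem.Set.add (g.getD (r name) PySem.Set.empty) name))
        (PySem.Dict.empty : PySem.Dict String (PySem.Set String))).contains (r n) = true := by
        rw [PySem.Dict.contains_iff_mem_keys, hkeys]; exact hc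
      have hmemit : ((r n), PySem.Set.ofList (t.filter (fun m => r m == r n)))
          ∈ (t.foldl (fun g name =>
          g.insert (r name) (PySem.Set.add (g.getD (r name) PySem.Set.empty) name))
        (PySem.Dict.empty : PySem.Dict String (PySem.Set String))).items := by
        rw [ih]
        exact List.mem_map.mpr ⟨r n, hc, rfl⟩
      have hgetD : (t.foldl (fun g name =>
          g.insert (r name) (PySem.Set.add (g.getD (r name) PySem.Set.empty) name))
        (PySem.Dict.empty : PySem.Dict String (PySem.Set String))).getD (r n) PySem.Set.empty
          = PySem.Set.ofList (t.filter (fun m => r m == r n)) :=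
        PySem.Dict.getD_of_mem_items _ hmemit hnodup _
      rw [PySem.Dict.items_insert_of_contains _ _ hcont, hgetD, ih, set_add_of_mem' hc]
      rw [List.map_map]
      apply List.map_congr_left
      intro rt hrt
      simp only [Function.comp_apply]
      by_cases hrtn : rt = r n
      · rw [hrtn]
        simp only [beq_self_eq_true, if_true]
        rw [List.filter_append]
        rw [show List.filter (fun m => r m == r n) [n] = [n] from by simp]
        rw [set_ofList_append]
      · have hbeq : (rt == r n) = false := by
          simp [hrtn]
        rw [hbeq]
        simp only [Bool.false_eq_true, if_false]
        rw [List.filter_append]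
        rw [show List.filter (fun m => r m == rt) [n] = [] from by
          simp
          intro hc2
          exact absurd hc2.symm hrtn]
        rw [List.append_nil]
    · have hcont : (t.foldl (fun g name =>
          g.insert (r name) (PySem.Set.add (g.getD (r name) PySem.Set.empty) name))
        (PySem.Dict.empty : PySem.Dict String (PySem.Set String))).contains (r n) = false := by
        rw [Bool.eq_false_iff]
        intro hc2
        rw [PySem.Dict.contains_iff_mem_keys, hkeys] at hc2
        exact hc hc2
      have hgetD : (t.foldl (fun g name =>
          g.insert (r name) (PySem.Set.add (g.getD (r name) PySem.Set.empty) name))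
        (PySem.Dict.empty : PySem.Dict String (PySem.Set String))).getD (r n) PySem.Set.empty
          = PySem.Set.empty := PySem.Dict.getD_of_not_contains _ _ hcont
      rw [PySem.Dict.items_insert_of_not_contains _ _ hcont, hgetD, ih, set_add_of_not_mem' hc]
      rw [List.map_append, List.map_singleton]
      congr 1
      · apply List.map_congr_left
        intro rt hrt
        rw [List.filter_append]
        rw [show List.filter (fun m => r m == rt) [n] = [] from by
          simp
          intro hc2
          exact hc (by rw [hc2]; exact hrt)]
        rw [List.append_nil]
      · have hfilt : List.filter (fun m => r m == r n) t = [] := by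
          rw [List.filter_eq_nil_iff]
          intro m hm hbeq
          rw [beq_iff_eq] at hbeq
          apply hc
          rw [PySem.Set.mem_ofList]
          exact List.mem_map.mpr ⟨m, hm, hbeq⟩
        rw [List.filter_append, hfilt, List.nil_append]
        rw [show List.filter (fun m => r m == r n) [n] = [n] from by simp]
        rfl

-- the result loop: disjoint member lists over fresh keys simply concatenate
theorem resultA_fold :
    ∀ (S : List (List String)) (R : PySem.Dict String (List String)),
    (∀ s ∈ S, s.Nodup) → List.Pairwise List.Disjoint S →
    (∀ s ∈ S, ∀ m ∈ s, R.contains m = false) →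
    (S.foldl (fun R members => members.foldl (fun R n => R.insert n members) R) R).items
      = R.items ++ S.flatMap (fun s => s.map (fun m => (m, s))) := by
  intro S
  induction S with
  | nil => intro R _ _ _; simp
  | cons s S ih =>
    intro R hnd hdis hfresh
    rw [List.foldl_cons]
    have hitems : (s.foldl (fun R n => R.insert n s) R).items
        = R.items ++ s.map (fun m => (m, s)) :=
      PySem.Dict.items_foldl_insert_fresh s (fun m => m) (fun _ => s) R
        (fun a ha => hfresh s (by simp) a ha)
        (by simpa using hnd s (by simp))
    have hkeys : (s.foldl (fun R n => R.insert n s) R).keys = R.keys ++ s := by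
      have h0 : (s.foldl (fun R n => R.insert n s) R).keys
          = (s.foldl (fun R n => R.insert n s) R).items.map (fun p => p.1) := rfl
      rw [h0, hitems, List.map_append, List.map_map]
      have h1 : R.items.map (fun p => p.1) = R.keys := rfl
      rw [h1]
      have h2 : List.map ((fun (p : String × List String) => p.1) ∘ fun m => (m, s)) s = s :=
        (List.map_congr_left (fun a _ => rfl)).trans (List.map_id s)
      rw [h2]
    have hfresh' : ∀ s' ∈ S, ∀ m ∈ s', (s.foldl (fun R n => R.insert n s) R).contains m = false := by
      intro s' hs' m hm
      rw [Bool.eq_false_iff]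
      intro hc
      rw [PySem.Dict.contains_iff_mem_keys, hkeys, List.mem_append] at hc
      rcases hc with hc | hc
      · have := hfresh s' (by simp [hs']) m hm
        rw [Bool.eq_false_iff] at this
        exact this (by rw [PySem.Dict.contains_iff_mem_keys]; exact hc)
      · exact (List.pairwise_cons.mp hdis).1 s' hs' hc hm
    rw [ih _ (fun s' hs' => hnd s' (by simp [hs'])) (List.pairwise_cons.mp hdis).2 hfresh',
      hitems, List.flatMap_cons, List.append_assoc]

theorem set_mem_update {y : String} (S : PySem.Set String) (l : List String) :
    y ∈ PySem.Set.update S l ↔ y ∈ S ∨ y ∈ l := by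
  rw [PySem.Set.update_eq_append_filter, List.mem_append]
  constructor
  · rintro (h | h)
    · exact Or.inl h
    · exact Or.inr ((PySem.Set.mem_ofList _ _).mp (List.mem_filter.mp h).1)
  · rintro (h | h)
    · exact Or.inl h
    · by_cases hS : y ∈ S
      · exact Or.inl hS
      · refine Or.inr (List.mem_filter.mpr ⟨(PySem.Set.mem_ofList _ _).mpr h, ?_⟩)
        simp only [Bool.not_eq_eq_eq_not, Bool.not_true]
        exact Bool.eq_false_iff.mpr (fun hc => hS ((PySem.Set.contains_iff _ _).mp hc))

theorem emitB_fold (ord : List String) (hord : ord.Nodup) (cid : PySem.Dict String Int) :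
    ∀ (rest t : List String) (R : PySem.Dict String (List String)) (S : PySem.Set String),
    ord = t ++ rest →
    (∀ y, S.contains y = true ↔ (y ∈ ord ∧ ∃ m ∈ t, pvC cid m = pvC cid y)) →
    (∀ y, R.contains y = true ↔ (y ∈ ord ∧ ∃ m ∈ t, pvC cid m = pvC cid y)) →
    (rest.foldl (fun (st : PySem.Dict String (List String) × PySem.Set String) n =>
        if st.2.contains n then st
        else (ord.filter (fun m => cid.getD m 0 == cid.getD n 0)).foldl
          (fun st m => (st.1.insert m (ord.filter (fun m2 => cid.getD m2 0 == cid.getD n 0)),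
            st.2.add m)) st)
      (R, S)).1.items
    = R.items ++ (pvFirsts (pvC cid) t rest).flatMap
        (fun n => (ord.filter (fun m => cid.getD m 0 == cid.getD n 0)).map
          (fun m => (m, ord.filter (fun m2 => cid.getD m2 0 == cid.getD n 0)))) := by
  intro rest
  induction rest with
  | nil =>
    intro t R S _ _ _
    simp [pvFirsts]
  | cons n rest ih =>
    intro t R S hsplit hS hR
    have hnord : n ∈ ord := by rw [hsplit]; simp
    rw [List.foldl_cons]
    by_cases hc : S.contains n = true
    · have hstep : (if ((R, S) : PySem.Dict String (List String) × PySem.Set String).2.contains n = true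
          then ((R, S) : PySem.Dict String (List String) × PySem.Set String)
          else List.foldl
            (fun st m => (st.1.insert m (List.filter (fun m2 => cid.getD m2 0 == cid.getD n 0) ord),
              st.2.add m)) (R, S) (List.filter (fun m => cid.getD m 0 == cid.getD n 0) ord))
          = (R, S) := by
        rw [if_pos hc]
      rw [hstep]
      have hex : ∃ m ∈ t, pvC cid m = pvC cid n := ((hS n).mp hc).2
      have hany : (t.any (fun m => decide (pvC cid m = pvC cid n))) = true := by
        simp only [List.any_eq_true, decide_eq_true_eq]
        exact hex
      have hfirsts : pvFirsts (pvC cid) t (n :: rest) = pvFirsts (pvC cid) (t ++ [n]) rest := by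
        rw [pvFirsts, if_pos hany]
      rw [hfirsts]
      have hS' : ∀ y, S.contains y = true ↔ (y ∈ ord ∧ ∃ m ∈ t ++ [n], pvC cid m = pvC cid y) := by
        intro y
        rw [hS y]
        constructor
        · rintro ⟨hy, m, hm, he⟩
          exact ⟨hy, m, by simp [hm], he⟩
        · rintro ⟨hy, m, hm, he⟩
          rw [List.mem_append] at hm
          rcases hm with hm | hm
          · exact ⟨hy, m, hm, he⟩
          · obtain ⟨m0, hm0, he0⟩ := hex
            have : m = n := by simpa using hm
            exact ⟨hy, m0, hm0, by rw [he0, ← he, this]⟩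
      have hR' : ∀ y, R.contains y = true ↔ (y ∈ ord ∧ ∃ m ∈ t ++ [n], pvC cid m = pvC cid y) := by
        intro y
        rw [hR y, ← hS y, hS' y]
      exact ih (t ++ [n]) R S (by rw [hsplit]; simp) hS' hR'
    · have hcf : S.contains n = false := Bool.eq_false_iff.mpr hc
      have hnoex : ¬ ∃ m ∈ t, pvC cid m = pvC cid n :=
        fun hex => hc ((hS n).mpr ⟨hnord, hex⟩)
      have hany : (t.any (fun m => decide (pvC cid m = pvC cid n))) = false := by
        rw [Bool.eq_false_iff]
        intro hcc
        rw [List.any_eq_true] at hcc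
        obtain ⟨m, hm, he⟩ := hcc
        exact hnoex ⟨m, hm, of_decide_eq_true he⟩
      have hstep : (if ((R, S) : PySem.Dict String (List String) × PySem.Set String).2.contains n = true
          then ((R, S) : PySem.Dict String (List String) × PySem.Set String)
          else List.foldl
            (fun st m => (st.1.insert m (List.filter (fun m2 => cid.getD m2 0 == cid.getD n 0) ord),
              st.2.add m)) (R, S) (List.filter (fun m => cid.getD m 0 == cid.getD n 0) ord))
          = ((ord.filter (fun m => cid.getD m 0 == cid.getD n 0)).foldl
              (fun R m => R.insert m (ord.filter (fun m2 => cid.getD m2 0 == cid.getD n 0))) R,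
            (ord.filter (fun m => cid.getD m 0 == cid.getD n 0)).foldl PySem.Set.add S) := by
        rw [if_neg (by rw [hcf]; exact fun hcc => Bool.false_ne_true hcc)]
        exact PySem.List.foldl_prod_mk
          (fun R m => R.insert m (List.filter (fun m2 => cid.getD m2 0 == cid.getD n 0) ord))
          (fun S m => PySem.Set.add S m)
          (List.filter (fun m => cid.getD m 0 == cid.getD n 0) ord) R S
      rw [hstep]
      -- membership in this component
      have hmm : ∀ y, y ∈ ord.filter (fun m => cid.getD m 0 == cid.getD n 0)
          ↔ (y ∈ ord ∧ pvC cid y = pvC cid n) := by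
        intro y
        rw [List.mem_filter]
        constructor
        · rintro ⟨h1, h2⟩
          exact ⟨h1, by simpa [pvC] using h2⟩
        · rintro ⟨h1, h2⟩
          exact ⟨h1, by simpa [pvC] using h2⟩
      have hfreshm : ∀ a ∈ ord.filter (fun m => cid.getD m 0 == cid.getD n 0),
          R.contains a = false := by
        intro a ha
        obtain ⟨haord, hacf⟩ := (hmm a).mp ha
        rw [Bool.eq_false_iff]
        intro hcc
        obtain ⟨-, m, hm, he⟩ := (hR a).mp hcc
        exact hnoex ⟨m, hm, by rw [he, hacf]⟩
      have hndm : (ord.filter (fun m => cid.getD m 0 == cid.getD n 0)).Nodup :=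
        hord.filter _
      have hitems : ((ord.filter (fun m => cid.getD m 0 == cid.getD n 0)).foldl
          (fun R m => R.insert m (ord.filter (fun m2 => cid.getD m2 0 == cid.getD n 0))) R).items
          = R.items ++ (ord.filter (fun m => cid.getD m 0 == cid.getD n 0)).map
            (fun m => (m, ord.filter (fun m2 => cid.getD m2 0 == cid.getD n 0))) :=
        PySem.Dict.items_foldl_insert_fresh _ (fun m => m) _ R hfreshm (by simpa using hndm)
      have hkeys : ((ord.filter (fun m => cid.getD m 0 == cid.getD n 0)).foldl
          (fun R m => R.insert m (ord.filter (fun m2 => cid.getD m2 0 == cid.getD n 0))) R).keys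
          = R.keys ++ ord.filter (fun m => cid.getD m 0 == cid.getD n 0) := by
        have h0 : ((ord.filter (fun m => cid.getD m 0 == cid.getD n 0)).foldl
            (fun R m => R.insert m (ord.filter (fun m2 => cid.getD m2 0 == cid.getD n 0))) R).keys
            = ((ord.filter (fun m => cid.getD m 0 == cid.getD n 0)).foldl
            (fun R m => R.insert m (ord.filter (fun m2 => cid.getD m2 0 == cid.getD n 0))) R).items.map
              (fun p => p.1) := rfl
        have h1 : R.items.map (fun (p : String × List String) => p.1) = R.keys := rfl
        rw [h0, hitems, List.map_append, h1, List.map_map]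
        have h2 : List.map ((fun (p : String × List String) => p.1)
            ∘ fun m => (m, ord.filter (fun m2 => cid.getD m2 0 == cid.getD n 0)))
            (ord.filter (fun m => cid.getD m 0 == cid.getD n 0))
            = ord.filter (fun m => cid.getD m 0 == cid.getD n 0) :=
          (List.map_congr_left (fun a _ => rfl)).trans (List.map_id _)
        rw [h2]
      have hR'' : ∀ y, ((ord.filter (fun m => cid.getD m 0 == cid.getD n 0)).foldl
          (fun R m => R.insert m (ord.filter (fun m2 => cid.getD m2 0 == cid.getD n 0))) R).contains y = true
          ↔ (y ∈ ord ∧ ∃ m ∈ t ++ [n], pvC cid m = pvC cid y) := by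
        intro y
        rw [PySem.Dict.contains_iff_mem_keys, hkeys, List.mem_append,
          ← PySem.Dict.contains_iff_mem_keys, hmm y]
        constructor
        · rintro (h | ⟨h1, h2⟩)
          · obtain ⟨hy, m, hm, he⟩ := (hR y).mp h
            exact ⟨hy, m, by simp [hm], he⟩
          · exact ⟨h1, n, by simp, h2.symm⟩
        · rintro ⟨hy, m, hm, he⟩
          rw [List.mem_append] at hm
          rcases hm with hm | hm
          · exact Or.inl ((hR y).mpr ⟨hy, m, hm, he⟩)
          · have hmn : m = n := by simpa using hm
            exact Or.inr ⟨hy, by rw [← he, hmn]⟩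
      have hS'' : ∀ y, ((ord.filter (fun m => cid.getD m 0 == cid.getD n 0)).foldl
          PySem.Set.add S).contains y = true
          ↔ (y ∈ ord ∧ ∃ m ∈ t ++ [n], pvC cid m = pvC cid y) := by
        intro y
        have hupd : (ord.filter (fun m => cid.getD m 0 == cid.getD n 0)).foldl PySem.Set.add S
            = PySem.Set.update S (ord.filter (fun m => cid.getD m 0 == cid.getD n 0)) := rfl
        rw [hupd, PySem.Set.contains_iff, set_mem_update]
        rw [← PySem.Set.contains_iff, hmm y]
        constructor
        · rintro (h | ⟨h1, h2⟩)
          · obtain ⟨hy, m, hm, he⟩ := (hS y).mp h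
            exact ⟨hy, m, by simp [hm], he⟩
          · exact ⟨h1, n, by simp, h2.symm⟩
        · rintro ⟨hy, m, hm, he⟩
          rw [List.mem_append] at hm
          rcases hm with hm | hm
          · exact Or.inl ((hS y).mpr ⟨hy, m, hm, he⟩)
          · have hmn : m = n := by simpa using hm
            exact Or.inr ⟨hy, by rw [← he, hmn]⟩
      have hres := ih (t ++ [n]) _ _ (by rw [hsplit]; simp) hS'' hR''
      rw [hres, hitems]
      have hfirsts : pvFirsts (pvC cid) t (n :: rest) = n :: pvFirsts (pvC cid) (t ++ [n]) rest := by
        rw [pvFirsts, if_neg (by rw [hany]; exact fun hcc => Bool.false_ne_true hcc)]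
      rw [hfirsts, List.flatMap_cons, List.append_assoc]

-- ===== main assembly =====
theorem build_connected_components_main (wn : List String) (ps : List (String × String)) :
    build_connected_components_py wn ps = build_connected_components_py_alt wn ps := by
  simp only [build_connected_components_py, build_connected_components_py_alt]
  have hordeq : PySem.Set.update ([] : List String) wn = PySem.Set.ofList wn := by
    rw [PySem.Set.ofList_eq_foldl]; rfl
  obtain ⟨b1, b2, b3, b4, b5⟩ := initB_char wn PySem.Dict.empty []
    (by intro z; simp) (by simp) (by intro x hx; simp at hx) (by intro x hx; simp at hx)
  rw [hordeq] at b1 b2 b3 b4 b5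
  rw [b1]
  set ORD := PySem.Set.ofList wn with hORD
  set P0 := wn.foldl (fun d n => d.insert n n) PySem.Dict.empty with hP0
  set C0 := (wn.foldl (fun st n => if st.1.contains n then st
      else (st.1.insert n (st.2.length : Int), st.2 ++ [n]))
      (PySem.Dict.empty, ([] : List String))).1 with hC0
  set CID := ps.foldl (fun c ab => if c.contains ab.1 && c.contains ab.2 then
      if c.getD ab.1 0 = c.getD ab.2 0 then c
      else ORD.foldl (fun c2 n => if c2.getD n 0 = c.getD ab.2 0
        then c2.insert n (c.getD ab.1 0) else c2) c
    else c) C0 with hCID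
  have hord : ORD.Nodup := PySem.Set.nodup_ofList _
  have hG0 : ∀ z, pvG P0 z = z :=
    initA_g wn PySem.Dict.empty (by intro z; simp [pvG])
  have hI0 : CoupInv ORD P0 C0 0 (fun z => z) := by
    refine ⟨initA_contains wn, b2, ?_, ?_, ?_⟩
    · intro z hz; rw [hG0 z]; exact hz
    · intro z hz; exact ⟨rfl, hG0 z⟩
    · intro x hx y hy
      exact (b4 x hx y hy).symm
  obtain ⟨r, hIK⟩ := pairs_fold (wn.length + ps.length + 1) ORD hord ps 0 P0 C0 _ hI0 (by omega)
  rw [← hCID] at hIK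
  obtain ⟨i1, i2, i3, i4, i5⟩ := hIK
  have hGA := groupsA_fold (wn.length + ps.length + 1) (0 + ps.length) ORD r
    (by omega) wn _ PySem.Dict.empty i4 i3
    (fun m hm => (PySem.Set.mem_ofList _ _).mpr hm)
  rw [hGA]
  have hvals : (wn.foldl (fun g name =>
      g.insert (r name) (PySem.Set.add (g.getD (r name) PySem.Set.empty) name))
      (PySem.Dict.empty : PySem.Dict String (PySem.Set String))).values
      = (PySem.Set.ofList (wn.map r)).map
        (fun rt => PySem.Set.ofList (wn.filter (fun m => r m == rt))) := by
    have h0 : (wn.foldl (fun g name =>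
        g.insert (r name) (PySem.Set.add (g.getD (r name) PySem.Set.empty) name))
        (PySem.Dict.empty : PySem.Dict String (PySem.Set String))).values
        = (wn.foldl (fun g name =>
        g.insert (r name) (PySem.Set.add (g.getD (r name) PySem.Set.empty) name))
        (PySem.Dict.empty : PySem.Dict String (PySem.Set String))).items.map (fun p => p.2) := rfl
    rw [h0, groupsPure_items, List.map_map]
    exact List.map_congr_left (fun rt _ => rfl)
  rw [hvals]
  have hresA := resultA_fold ((PySem.Set.ofList (wn.map r)).map
      (fun rt => PySem.Set.ofList (wn.filter (fun m => r m == rt)))) PySem.Dict.empty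
    (by
      intro s hs
      obtain ⟨rt, -, rfl⟩ := List.mem_map.mp hs
      exact PySem.Set.nodup_ofList _)
    (by
      have hnd : (PySem.Set.ofList (wn.map r)).Pairwise (fun a b => a ≠ b) :=
        PySem.Set.nodup_ofList (wn.map r)
      refine List.Pairwise.map _ (fun a b hab => ?_) hnd
      intro x hxa hxb
      have ha : r x = a := by
        have h1 := (PySem.Set.mem_ofList _ _).mp hxa
        exact beq_iff_eq.mp (List.mem_filter.mp h1).2
      have hb : r x = b := by
        have h1 := (PySem.Set.mem_ofList _ _).mp hxb
        exact beq_iff_eq.mp (List.mem_filter.mp h1).2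
      exact hab (ha.symm.trans hb))
    (by intro s _ m _; simp)
  rw [hresA, show (PySem.Dict.empty : PySem.Dict String (List String)).items = [] from rfl,
    List.nil_append]
  have hresB := emitB_fold ORD hord CID ORD [] PySem.Dict.empty PySem.Set.empty rfl
    (by intro y; simp [PySem.Set.empty]) (by intro y; simp)
  rw [hresB, show (PySem.Dict.empty : PySem.Dict String (List String)).items = [] from rfl,
    List.nil_append]
  have hroots : PySem.Set.ofList (wn.map r) = (pvFirsts r [] ORD).map r := by
    rw [hORD, set_ofList_map_ofList, set_ofList_map_firsts]
  rw [hroots, List.flatMap_map, List.flatMap_map]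
  have hfirstseq : pvFirsts r [] ORD = pvFirsts (pvC CID) [] ORD := by
    apply pvFirsts_congr
    intro m hm n hn
    simp only [List.nil_append] at hm hn
    exact i5 m hm n hn
  rw [← hfirstseq]
  apply List.flatMap_congr
  intro n hn
  have hnord : n ∈ ORD := pvFirsts_subset r _ [] n hn
  have hmemeq : PySem.Set.ofList (wn.filter (fun m => r m == r n))
      = ORD.filter (fun m => CID.getD m 0 == CID.getD n 0) := by
    rw [hORD, set_ofList_filter, ← hORD]
    apply List.filter_congr
    intro m hm
    rw [Bool.eq_iff_iff, beq_iff_eq, beq_iff_eq]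
    exact i5 m hm n hnord
  rw [hmemeq]

-- ===== VERDICT (by name: the statement is the Claim_ definition above) =====
theorem build_connected_components_py_spec : Claim_equal_build_connected_components_py := by
  intro wn ps _
  unfold Spec_build_connected_components_py
  exact build_connected_components_main wn ps
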